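-- pv_equiv track=rewrite | github.com/doodlebunnyhops/NookLook | bot/utils/localization.py | _translate_single_source
-- ===== SOURCE A (Python) =====
-- from typing import Dict, Optional
--
-- def _translate_single_source(source: str, lang_sources: Dict[str, str]) -> str:
--     """Translate a single source component.
--
--     Args:
--         source: Single source string (no semicolons)
--         lang_sources: Dictionary of translations for the language
--
--     Returns:
--         Translated source or original if no translation found
--     """
--     source = source.strip()
--
--     # Try exact match first
--     if source in lang_sources:
--         return lang_sources[source]
--
--     # Try case-insensitive match
--     source_lower = source.lower()
--     for eng_src, translated in lang_sources.items():
--         if eng_src.lower() == source_lower: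
--             return translated
--
--     # Handle parenthetical modifiers like "(unlocked after 20 donations)"
--     # or "(while stung)" by checking if inner text is translatable
--     if source.startswith('(') and source.endswith(')'):
--         inner = source[1:-1]
--         if inner in lang_sources:
--             return f"({lang_sources[inner]})"
--         inner_lower = inner.lower()
--         for eng_src, translated in lang_sources.items():
--             if eng_src.lower() == inner_lower:
--                 return f"({translated})"
--
--     return source
-- ===== SOURCE B (Python) =====
-- def _rank(key, s, s_lower, inner, inner_lower):
--     """Priority of a dictionary key as a match for s: 1 exact, 2 case-insensitive,
--     3 exact on the parenthetical inner text, 4 case-insensitive on it, 5 no match."""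
--     if key == s:
--         return 1
--     if key.lower() == s_lower:
--         return 2
--     if inner is not None:
--         if key == inner:
--             return 3
--         if key.lower() == inner_lower:
--             return 4
--     return 5
--
--
-- def _translate_single_source(source: str, lang_sources: dict) -> str:
--     """Translate a single source component (single-pass priority scan)."""
--     s = source.strip()
--     if s.startswith('(') and s.endswith(')'):
--         inner = s[1:-1]
--         inner_lower = inner.lower()
--     else:
--         inner = None
--         inner_lower = None
--     s_lower = s.lower()
--     best_rank, best_val = 5, None
--     for key, value in lang_sources.items():
--         r = _rank(key, s, s_lower, inner, inner_lower)
--         if r < best_rank: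
--             best_rank, best_val = r, value
--     if best_val is None:
--         return s
--     return best_val if best_rank <= 2 else f"({best_val})"
-- ===== Notes on version B (the rewrite author's own statement) =====
-- stated objective: alternative
-- what changed: Replaces A's four staged scans (exact, case-insensitive, then exact and case-insensitive on the parenthesis-stripped text) with a single pass that ranks every key 1-4 against all four candidates at once and keeps the first best-ranked match, deciding the output (plain, parenthesised, or untranslated) from the winning rank.
import Mathlib
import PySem

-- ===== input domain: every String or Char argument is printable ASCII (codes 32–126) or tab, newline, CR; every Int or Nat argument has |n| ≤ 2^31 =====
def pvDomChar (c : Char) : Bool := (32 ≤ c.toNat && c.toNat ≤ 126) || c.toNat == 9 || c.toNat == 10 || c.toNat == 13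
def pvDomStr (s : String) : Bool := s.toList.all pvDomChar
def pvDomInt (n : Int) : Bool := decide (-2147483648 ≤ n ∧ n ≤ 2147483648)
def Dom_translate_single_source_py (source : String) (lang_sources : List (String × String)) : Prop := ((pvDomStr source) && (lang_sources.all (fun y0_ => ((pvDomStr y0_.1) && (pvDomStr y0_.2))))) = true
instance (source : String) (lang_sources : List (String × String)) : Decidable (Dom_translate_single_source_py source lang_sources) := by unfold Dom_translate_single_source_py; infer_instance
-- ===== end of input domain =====

-- B replaces A's four staged scans with one pass that ranks every key 1-4 against all four
-- candidate matches at once and keeps the first best-ranked one; same results, one traversal.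

-- ===== PORT A =====
-- the `for eng_src, translated in lang_sources.items(): if eng_src.lower() == sl: return translated` loop
def pvA_ciLoop (sl : String) : List (String × String) → Option String
  | [] => none
  | (k, v) :: rest => if PySem.Str.lower k == sl then some v else pvA_ciLoop sl rest

def translate_single_source_py (source : String) (lang_sources : List (String × String)) : String :=
  let source := PySem.Str.strip source
  match lang_sources.find? (fun p => p.1 == source) with  -- `if source in lang_sources: return lang_sources[source]` (first match)
  | some (_, v) => v
  | none =>
    let source_lower := PySem.Str.lower source
    match pvA_ciLoop source_lower lang_sources with
    | some v => v
    | none =>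
      if PySem.Str.startswith source "(" && PySem.Str.endswith source ")" then
        let inner := PySem.Str.slice source (some 1) (some (-1))  -- source[1:-1]
        match lang_sources.find? (fun p => p.1 == inner) with
        | some (_, v) => "(" ++ v ++ ")"
        | none =>
          match pvA_ciLoop (PySem.Str.lower inner) lang_sources with
          | some v => "(" ++ v ++ ")"
          | none => source
      else source

-- ===== PORT B =====
-- the `_rank` helper; ii carries (inner, inner_lower) when s is parenthesised, none otherwise
def pvB_rank (key s sl : String) (ii : Option (String × String)) : Nat :=
  if key == s then 1
  else if PySem.Str.lower key == sl then 2
  else match ii with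
    | some (inner, il) => if key == inner then 3 else if PySem.Str.lower key == il then 4 else 5
    | none => 5

def translate_single_source_py_alt (source : String) (lang_sources : List (String × String)) : String :=
  let s := PySem.Str.strip source
  let ii : Option (String × String) :=
    if PySem.Str.startswith s "(" && PySem.Str.endswith s ")" then
      let inner := PySem.Str.slice s (some 1) (some (-1))
      some (inner, PySem.Str.lower inner)
    else none
  let sl := PySem.Str.lower s
  let best := lang_sources.foldl
    (fun (acc : Nat × Option String) p =>
      let r := pvB_rank p.1 s sl ii
      if r < acc.1 then (r, some p.2) else acc)
    ((5 : Nat), (none : Option String))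
  match best.2 with
  | none => s
  | some v => if best.1 ≤ 2 then v else "(" ++ v ++ ")"

-- ===== PRECONDITION & SPEC =====
def Spec_translate_single_source_py (source : String) (lang_sources : List (String × String)) (out : String) : Prop := out = translate_single_source_py_alt source lang_sources
instance (source : String) (lang_sources : List (String × String)) (out : String) : Decidable (Spec_translate_single_source_py source lang_sources out) := by unfold Spec_translate_single_source_py; infer_instance

-- ===== CLAIM (what is proved, stated in full; the proofs are below) =====
def Claim_equal_translate_single_source_py : Prop := ∀ (source : String) (lang_sources : List (String × String)), Dom_translate_single_source_py source lang_sources → Spec_translate_single_source_py source lang_sources (translate_single_source_py source lang_sources)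

-- ===== LEMMAS AND PROOFS =====

-- proof-side: structural "first minimal-rank element" of the list
def pvMrec (s sl : String) (ii : Option (String × String)) : List (String × String) → Nat × Option String
  | [] => (5, none)
  | p :: rest =>
    let m := pvMrec s sl ii rest
    let r := pvB_rank p.1 s sl ii
    if r < 5 ∧ r ≤ m.1 then (r, some p.2) else m

-- proof-side: A's four stages as one value tagged with the stage number
def pvStaged (s sl : String) (ii : Option (String × String)) (xs : List (String × String)) : Nat × Option String :=
  match xs.find? (fun p => p.1 == s) with
  | some p => (1, some p.2)
  | none =>
    match pvA_ciLoop sl xs with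
    | some v => (2, some v)
    | none =>
      match ii with
      | none => (5, none)
      | some (inner, il) =>
        match xs.find? (fun p => p.1 == inner) with
        | some p => (3, some p.2)
        | none =>
          match pvA_ciLoop il xs with
          | some v => (4, some v)
          | none => (5, none)

theorem pvMrec_fst_le (s sl : String) (ii : Option (String × String)) (xs : List (String × String)) :
    (pvMrec s sl ii xs).1 ≤ 5 := by
  induction xs with
  | nil => simp [pvMrec]
  | cons p rest ih =>
    simp only [pvMrec]
    split
    · omega
    · exact ih

theorem pvMrec_none_of_five (s sl : String) (ii : Option (String × String)) (xs : List (String × String)) :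
    (pvMrec s sl ii xs).1 = 5 → pvMrec s sl ii xs = (5, none) := by
  induction xs with
  | nil => simp [pvMrec]
  | cons p rest ih =>
    simp only [pvMrec]
    split
    · intro h5; omega
    · exact ih

-- the one-pass fold from an arbitrary accumulator (b, val) with b ≤ 5
theorem pvB_rank_le (key s sl : String) (ii : Option (String × String)) : pvB_rank key s sl ii ≤ 5 := by
  obtain _ | ⟨inner, il⟩ := ii <;> simp only [pvB_rank] <;> split_ifs <;> omega

theorem pvFold_eq_mrec_aux (s sl : String) (ii : Option (String × String))
    (xs : List (String × String)) (b : Nat) (val : Option String) (hb : b ≤ 5) :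
    xs.foldl (fun (acc : Nat × Option String) p =>
        let r := pvB_rank p.1 s sl ii
        if r < acc.1 then (r, some p.2) else acc) (b, val)
      = (if (pvMrec s sl ii xs).1 < b then pvMrec s sl ii xs else (b, val)) := by
  induction xs generalizing b val with
  | nil =>
    simp only [List.foldl_nil, pvMrec]
    rw [if_neg (by omega)]
  | cons p rest ih =>
    simp only [List.foldl_cons]
    have hr5 := pvB_rank_le p.1 s sl ii
    have hm5 := pvMrec_fst_le s sl ii rest
    simp only [pvMrec]
    by_cases hr : pvB_rank p.1 s sl ii < b
    · rw [if_pos hr, ih _ _ (by omega)]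
      split_ifs <;> simp_all <;> omega
    · rw [if_neg hr, ih _ _ hb]
      split_ifs <;> simp_all <;> omega

theorem pvFold_eq_mrec (s sl : String) (ii : Option (String × String)) (xs : List (String × String)) :
    xs.foldl (fun (acc : Nat × Option String) p =>
        let r := pvB_rank p.1 s sl ii
        if r < acc.1 then (r, some p.2) else acc) ((5 : Nat), (none : Option String))
      = pvMrec s sl ii xs := by
  rw [pvFold_eq_mrec_aux s sl ii xs 5 none (le_refl 5)]
  by_cases h : (pvMrec s sl ii xs).1 < 5
  · rw [if_pos h]
  · rw [if_neg h]
    have := pvMrec_fst_le s sl ii xs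
    exact (pvMrec_none_of_five s sl ii xs (by omega)).symm

-- head-step characterisation of A's staged result: it IS the first-minimal-rank choice
theorem pvStaged_cons (s sl k v : String) (ii : Option (String × String)) (rest : List (String × String)) :
    pvStaged s sl ii ((k, v) :: rest)
      = (if pvB_rank k s sl ii < 5 ∧ pvB_rank k s sl ii ≤ (pvStaged s sl ii rest).1
         then (pvB_rank k s sl ii, some v) else pvStaged s sl ii rest) := by
  obtain _ | ⟨inner, il⟩ := ii
  · cases hf : rest.find? (fun p => p.1 == s) <;>
    cases hc : pvA_ciLoop sl rest <;>
    by_cases h1 : (k == s) = true <;>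
    by_cases h2 : (PySem.Str.lower k == sl) = true <;>
    simp [pvStaged, pvA_ciLoop, pvB_rank, h1, h2, hf, hc]
  · cases hf : rest.find? (fun p => p.1 == s) <;>
    cases hc : pvA_ciLoop sl rest <;>
    cases hfi : rest.find? (fun p => p.1 == inner) <;>
    cases hci : pvA_ciLoop il rest <;>
    by_cases h1 : (k == s) = true <;>
    by_cases h2 : (PySem.Str.lower k == sl) = true <;>
    by_cases h3 : (k == inner) = true <;>
    by_cases h4 : (PySem.Str.lower k == il) = true <;>
    simp [pvStaged, pvA_ciLoop, pvB_rank, h1, h2, h3, h4, hf, hc, hfi, hci]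

theorem pvMrec_eq_staged (s sl : String) (ii : Option (String × String)) (xs : List (String × String)) :
    pvMrec s sl ii xs = pvStaged s sl ii xs := by
  induction xs with
  | nil => obtain _ | ⟨inner, il⟩ := ii <;> simp [pvMrec, pvStaged, pvA_ciLoop]
  | cons p rest ih =>
    obtain ⟨k, v⟩ := p
    simp only [pvMrec, ih, pvStaged_cons]

-- ===== VERDICT (by name: the statement is the Claim_ definition above) =====
theorem translate_single_source_py_spec : Claim_equal_translate_single_source_py := by
  intro source lang_sources _
  unfold Spec_translate_single_source_py
  simp only [translate_single_source_py, translate_single_source_py_alt]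
  rw [pvFold_eq_mrec, pvMrec_eq_staged]
  by_cases hp : (PySem.Str.startswith (PySem.Str.strip source) "(" && PySem.Str.endswith (PySem.Str.strip source) ")") = true
  · simp only [hp, if_true]
    cases hf : lang_sources.find? (fun p => p.1 == PySem.Str.strip source) with
    | some p => simp [pvStaged, hf]
    | none =>
      cases hc : pvA_ciLoop (PySem.Str.lower (PySem.Str.strip source)) lang_sources with
      | some v => simp [pvStaged, hf, hc]
      | none =>
        cases hfi : lang_sources.find? (fun p => p.1 == PySem.Str.slice (PySem.Str.strip source) (some 1) (some (-1))) with
        | some p => simp [pvStaged, hf, hc, hfi]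
        | none =>
          cases hci : pvA_ciLoop (PySem.Str.lower (PySem.Str.slice (PySem.Str.strip source) (some 1) (some (-1)))) lang_sources with
          | some v => simp [pvStaged, hf, hc, hfi, hci]
          | none => simp [pvStaged, hf, hc, hfi, hci]
  · simp only [hp, Bool.false_eq_true, if_false]
    cases hf : lang_sources.find? (fun p => p.1 == PySem.Str.strip source) with
    | some p => simp [pvStaged, hf]
    | none =>
      cases hc : pvA_ciLoop (PySem.Str.lower (PySem.Str.strip source)) lang_sources with
      | some v => simp [pvStaged, hf, hc]
      | none => simp [pvStaged, hf, hc]
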